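-- pv_equiv track=rewrite | github.com/pa-deasy/PythonKatas | big_o/big_o_examples.py | foo_sum_product
-- ===== SOURCE A (Python) =====
-- def foo_sum_product(numbers: list[int]) -> tuple[int, int]:
--     sum = 0
--     product = 1
--     for number in numbers:
--         sum += number
--     for number in numbers:
--         product *= number
--
--     return sum, product
-- ===== SOURCE B (Python) =====
-- def foo_sum_product(numbers: list[int]) -> tuple[int, int]:
--     s, p = 0, 1
--     for number in numbers:
--         s += number
--         p *= number
--     return s, p
-- ===== Notes on version B (the rewrite author's own statement) =====
-- stated objective: alternative
-- what changed: B traverses the list once, updating sum and product together in a single loop, instead of A's two separate passes.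
import Mathlib
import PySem

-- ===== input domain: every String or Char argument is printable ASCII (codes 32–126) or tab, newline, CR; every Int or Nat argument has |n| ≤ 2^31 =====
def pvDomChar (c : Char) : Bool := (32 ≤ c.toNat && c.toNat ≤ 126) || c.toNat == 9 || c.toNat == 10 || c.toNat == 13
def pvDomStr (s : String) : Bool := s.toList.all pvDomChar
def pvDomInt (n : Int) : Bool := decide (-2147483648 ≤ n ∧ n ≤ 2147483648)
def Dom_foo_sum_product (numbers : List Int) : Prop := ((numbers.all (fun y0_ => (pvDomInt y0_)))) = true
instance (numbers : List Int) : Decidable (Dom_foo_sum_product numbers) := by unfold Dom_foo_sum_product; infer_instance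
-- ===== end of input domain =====

-- ===== PORT A =====
-- One honest line: B makes a single pass updating both accumulators; A makes two passes.
def foo_sum_product (numbers : List Int) : Int × Int :=
  let sum := numbers.foldl (fun s number => s + number) 0
  let product := numbers.foldl (fun p number => p * number) 1
  (sum, product)

-- ===== PORT B =====
def foo_sum_product_alt (numbers : List Int) : Int × Int :=
  numbers.foldl (fun sp number => (sp.1 + number, sp.2 * number)) (0, 1)

-- ===== PRECONDITION & SPEC =====
def Spec_foo_sum_product (numbers : List Int) (out : Int × Int) : Prop := out = foo_sum_product_alt numbers
instance (numbers : List Int) (out : Int × Int) : Decidable (Spec_foo_sum_product numbers out) := by unfold Spec_foo_sum_product; infer_instance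

-- ===== CLAIM (what is proved, stated in full; the proofs are below) =====
def Claim_equal_foo_sum_product : Prop := ∀ (numbers : List Int), Dom_foo_sum_product numbers → Spec_foo_sum_product numbers (foo_sum_product numbers)

-- ===== LEMMAS AND PROOFS =====

-- ===== VERDICT (by name: the statement is the Claim_ definition above) =====
theorem fsp_fuse (numbers : List Int) (s p : Int) :
    numbers.foldl (fun sp number => (sp.1 + number, sp.2 * number)) (s, p)
      = (numbers.foldl (fun a n => a + n) s, numbers.foldl (fun a n => a * n) p) := by
  induction numbers generalizing s p with
  | nil => rfl
  | cons x xs ih => simp [List.foldl, ih]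

theorem foo_sum_product_spec : Claim_equal_foo_sum_product := by
  intro numbers _
  unfold Spec_foo_sum_product foo_sum_product foo_sum_product_alt
  exact (fsp_fuse numbers 0 1).symm
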